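-- pv_equiv track=rewrite | github.com/tony102741/firmware_project | src/core/analyzer/scoring.py | is_logging_only_sink
-- ===== SOURCE A (Python) =====
-- _EXEC_SINK_KEYS = {
--     "system", "popen", "execl", "execv", "execle", "execve",
--     "execvp", "execlp", "dlopen", "dlsym",
--     "strcpy", "strcat", "sprintf", "vsprintf", "gets",
--     "memcpy", "__memcpy_chk", "read(", "fwrite", "write(",
-- }
--
-- def is_logging_only_sink(all_sinks):
--     """
--     Return True if all detected sinks are logging functions with no exec or
--     memory-corruption operations present.
--
--     printf / fprintf / syslog are only dangerous for format-string bugs — a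
--     much narrower attack surface than command execution or stack overflows.
--     When every sink is a logging call, the binary is deprioritised (~50% score
--     reduction) so higher-severity candidates rank above it.
--
--     Returns False (safe to keep) when all_sinks is empty — no sinks means the
--     binary already filtered out before this check.
--     """
--     if not all_sinks:
--         return False
--     for sink in all_sinks:
--         l = sink.lower()
--         if any(k in l for k in _EXEC_SINK_KEYS):
--             return False   # at least one exec / memory sink found
--     return True
-- ===== SOURCE B (Python) =====
-- _EXEC_SINK_KEYS = {
--     "system", "popen", "execl", "execv", "execle", "execve",
--     "execvp", "execlp", "dlopen", "dlsym",
--     "strcpy", "strcat", "sprintf", "vsprintf", "gets",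
--     "memcpy", "__memcpy_chk", "read(", "fwrite", "write(",
-- }
--
-- # position-major sliding-window matcher: one hashed set of keys and the set of
-- # key lengths; at each position of the lowered string look up each fixed-length
-- # window in the set, instead of scanning the string once per key.
-- _KEYS = frozenset(_EXEC_SINK_KEYS)
-- _KEY_LENS = sorted({len(k) for k in _EXEC_SINK_KEYS})
--
--
-- def is_logging_only_sink(all_sinks):
--     if not all_sinks:
--         return False
--     for sink in all_sinks:
--         l = sink.lower()
--         for i in range(len(l)):
--             for L in _KEY_LENS:
--                 if l[i:i + L] in _KEYS:
--                     return False
--     return True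
-- ===== Notes on version B (the rewrite author's own statement) =====
-- stated objective: alternative
-- what changed: B replaces A's key-major scan (substring-search the lowered sink once per key) by a position-major sliding-window matcher: it walks each lowered sink once and at every position looks up the windows of the six possible key lengths in a hashed key set, so the per-key substring scan disappears.
import Mathlib
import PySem

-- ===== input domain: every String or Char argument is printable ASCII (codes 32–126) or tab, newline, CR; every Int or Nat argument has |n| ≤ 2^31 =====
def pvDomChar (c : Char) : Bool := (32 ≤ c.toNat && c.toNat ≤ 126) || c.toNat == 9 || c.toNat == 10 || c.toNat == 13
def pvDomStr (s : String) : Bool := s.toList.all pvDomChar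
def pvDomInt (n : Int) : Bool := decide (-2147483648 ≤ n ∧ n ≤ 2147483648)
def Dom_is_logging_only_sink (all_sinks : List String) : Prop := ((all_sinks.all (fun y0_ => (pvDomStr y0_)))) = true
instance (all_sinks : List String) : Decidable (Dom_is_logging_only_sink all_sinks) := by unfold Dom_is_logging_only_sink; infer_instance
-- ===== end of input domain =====

-- B is an alternative algorithm of similar cost: a position-major sliding-window matcher
-- (at each position of the lowered sink, look up the windows of the six key lengths in the
-- key set) instead of A's key-major per-key substring scan; the return value is proved equal.

-- the module constant _EXEC_SINK_KEYS (a frozen set of literals; only membership tests are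
-- made, so the iteration order of the Python set cannot influence either result)
def pvKeys : List String :=
  ["system", "popen", "execl", "execv", "execle", "execve",
   "execvp", "execlp", "dlopen", "dlsym",
   "strcpy", "strcat", "sprintf", "vsprintf", "gets",
   "memcpy", "__memcpy_chk", "read(", "fwrite", "write("]

-- ===== PORT A =====
-- the for-loop with early return False
def pvLoopA : List String → Bool
  | [] => true
  | sink :: rest =>
    let l := PySem.Str.lower sink
    if pvKeys.any (fun k => PySem.Str.isIn k l) then false else pvLoopA rest

def is_logging_only_sink (all_sinks : List String) : Bool :=
  if all_sinks.isEmpty then false else pvLoopA all_sinks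

-- ===== PORT B =====
-- _KEYS as the distinct key character-lists, _KEY_LENS = sorted set of their lengths
def pvKeyChars : List (List Char) := pvKeys.map String.toList
def pvKeyLens : List Nat := [4, 5, 6, 7, 8, 12]

-- the inner 'for L in _KEY_LENS: if l[i:i+L] in _KEYS' test at one position;
-- l[i:i+L] for 0 ≤ i < len(l) is exactly (l.drop i).take L, so pvScan walks the
-- positions i = 0,1,… of the lowered string by dropping one character at a time
def pvHit (t : List Char) : Bool := pvKeyLens.any (fun L => pvKeyChars.contains (t.take L))

def pvScan : List Char → Bool
  | [] => false
  | t@(_ :: rest) => pvHit t || pvScan rest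

def pvLoopB : List String → Bool
  | [] => true
  | sink :: rest =>
    if pvScan (PySem.Chars.lower sink.toList) then false else pvLoopB rest

def is_logging_only_sink_alt (all_sinks : List String) : Bool :=
  if all_sinks.isEmpty then false else pvLoopB all_sinks

-- ===== PRECONDITION & SPEC =====
def Spec_is_logging_only_sink (all_sinks : List String) (out : Bool) : Prop := out = is_logging_only_sink_alt all_sinks
instance (all_sinks : List String) (out : Bool) : Decidable (Spec_is_logging_only_sink all_sinks out) := by unfold Spec_is_logging_only_sink; infer_instance

-- ===== CLAIM (what is proved, stated in full; the proofs are below) =====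
def Claim_equal_is_logging_only_sink : Prop := ∀ (all_sinks : List String), Dom_is_logging_only_sink all_sinks → Spec_is_logging_only_sink all_sinks (is_logging_only_sink all_sinks)

-- ===== LEMMAS AND PROOFS =====

-- every key is nonempty and its length is one of the six lengths in _KEY_LENS
lemma pv_key_len : ∀ k ∈ pvKeyChars, k ≠ [] ∧ k.length ∈ pvKeyLens := by decide

-- the per-position window test finds exactly the keys that are prefixes of the suffix t
lemma pv_hit_iff (t : List Char) : pvHit t = true ↔ ∃ k ∈ pvKeyChars, k <+: t := by
  unfold pvHit
  simp only [List.any_eq_true]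
  constructor
  · rintro ⟨L, _, hc⟩
    exact ⟨t.take L, by simpa using hc, List.take_prefix L t⟩
  · rintro ⟨k, hk, hpre⟩
    refine ⟨k.length, (pv_key_len k hk).2, ?_⟩
    have := List.prefix_iff_eq_take.mp hpre
    simpa [← this] using hk
lemma pv_scan_iff : ∀ (cs : List Char),
    (pvScan cs = true ↔ ∃ k ∈ pvKeyChars, k <:+: cs)
  | [] => by
    simp only [pvScan]
    constructor
    · intro h; exact absurd h (by simp)
    · rintro ⟨k, hk, hinf⟩
      have : k = [] := List.eq_nil_of_infix_nil hinf
      exact absurd this (pv_key_len k hk).1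
  | c :: rest => by
    show (pvHit (c :: rest) || pvScan rest) = true ↔ _
    rw [Bool.or_eq_true, pv_hit_iff, pv_scan_iff rest]
    constructor
    · rintro (⟨k, hk, hp⟩ | ⟨k, hk, hi⟩)
      · exact ⟨k, hk, hp.isInfix⟩
      · exact ⟨k, hk, hi.trans (List.suffix_cons c rest).isInfix⟩
    · rintro ⟨k, hk, hi⟩
      rcases List.infix_cons_iff.mp hi with hp | hi'
      · exact Or.inl ⟨k, hk, hp⟩
      · exact Or.inr ⟨k, hk, hi'⟩

-- per sink: A's any-key substring search agrees with B's position scan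
lemma pv_sink_eq (s : String) :
    pvKeys.any (fun k => PySem.Str.isIn k (PySem.Str.lower s))
      = pvScan (PySem.Chars.lower s.toList) := by
  rw [Bool.eq_iff_iff, List.any_eq_true, pv_scan_iff]
  constructor
  · rintro ⟨k, hk, hin⟩
    refine ⟨k.toList, List.mem_map_of_mem hk, ?_⟩
    rw [PySem.Str.isIn_iff_infix, PySem.Str.toList_lower] at hin
    exact hin
  · rintro ⟨kc, hkc, hinf⟩
    rcases List.mem_map.mp hkc with ⟨k, hk, rfl⟩
    refine ⟨k, hk, ?_⟩
    rw [PySem.Str.isIn_iff_infix, PySem.Str.toList_lower]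
    exact hinf

lemma pv_loop_eq : ∀ (xs : List String), pvLoopA xs = pvLoopB xs
  | [] => rfl
  | s :: rest => by
    show (if pvKeys.any (fun k => PySem.Str.isIn k (PySem.Str.lower s)) then false
          else pvLoopA rest)
        = (if pvScan (PySem.Chars.lower s.toList) then false else pvLoopB rest)
    rw [pv_sink_eq, pv_loop_eq rest]

-- ===== VERDICT (by name: the statement is the Claim_ definition above) =====
theorem is_logging_only_sink_spec : Claim_equal_is_logging_only_sink := by
  intro all_sinks _
  unfold Spec_is_logging_only_sink is_logging_only_sink is_logging_only_sink_alt
  rw [pv_loop_eq]
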